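-- pv_equiv track=rewrite | github.com/bhardwajRahul/blint | blint/lib/analysis.py | _safe_mermaid_label
-- ===== SOURCE A (Python) =====
-- def _safe_mermaid_label(value: str) -> str:
--     """Normalizes Mermaid labels to a parser-safe single-line representation."""
--     label = str(value or "")
--     label = (
--         label.replace("\r", " ")
--         .replace("\n", " ")
--         .replace("\t", " ")
--         .replace("\\", "/")
--         .replace('"', "'")
--         .replace("|", "/")
--         .replace("`", "'")
--     )
--     label = "".join(ch if ch.isprintable() else " " for ch in label)
--     return " ".join(label.split()).strip()
-- ===== SOURCE B (Python) =====
-- def _safe_mermaid_label(value: str) -> str: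
--     """Single-pass normalization: map each char through a substitution table,
--     blank non-printables, collapse space runs inline, drop the trailing space."""
--     label = str(value or "")
--     sub = {"\r": " ", "\n": " ", "\t": " ", "\\": "/", '"': "'", "|": "/", "`": "'"}
--     out = []
--     prev_space = True  # suppresses leading spaces and repeats
--     for ch in label:
--         ch = sub.get(ch, ch)
--         if not ch.isprintable():
--             ch = " "
--         if ch == " ":
--             if not prev_space:
--                 out.append(" ")
--             prev_space = True
--         else:
--             out.append(ch)
--             prev_space = False
--     if out and out[-1] == " ":
--         out.pop()
--     return "".join(out)
-- ===== Notes on version B (the rewrite author's own statement) =====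
-- stated objective: alternative
-- what changed: Replaces A's seven full-string replace passes plus a printable-filter pass plus split/join/strip with a single explicit pass that maps each char through a substitution dict, blanks non-printables, collapses space runs with a prev-space flag, and drops the one possible trailing space.
import Mathlib
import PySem

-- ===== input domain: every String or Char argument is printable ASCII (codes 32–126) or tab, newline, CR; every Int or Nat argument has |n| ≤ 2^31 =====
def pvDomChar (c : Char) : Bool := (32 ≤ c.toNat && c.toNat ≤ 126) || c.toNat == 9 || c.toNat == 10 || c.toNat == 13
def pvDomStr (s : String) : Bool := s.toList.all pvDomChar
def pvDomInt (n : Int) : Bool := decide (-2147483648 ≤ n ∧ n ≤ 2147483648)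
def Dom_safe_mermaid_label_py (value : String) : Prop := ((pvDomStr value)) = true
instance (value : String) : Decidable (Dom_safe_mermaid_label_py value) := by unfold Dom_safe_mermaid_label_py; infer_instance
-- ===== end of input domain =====

-- B replaces A's seven replace passes + printable filter + split/join/strip with one
-- explicit pass (substitution table, prev-space flag, drop one trailing space); same
-- return value, no speed claim ("alternative").

-- ===== PORT A =====
-- ch.isprintable(), exact on the ASCII domain (codes 32–126 printable; tab/newline/CR not)
def pvPrintable (ch : Char) : Bool := 32 ≤ ch.toNat && ch.toNat ≤ 126

def safe_mermaid_label_py (value : String) : String :=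
  -- label = str(value or "")
  let label := if value = "" then "" else value
  -- the chain of seven str.replace calls
  let label := PySem.Str.replace (PySem.Str.replace (PySem.Str.replace (PySem.Str.replace
      (PySem.Str.replace (PySem.Str.replace (PySem.Str.replace label "\r" " ")
      "\n" " ") "\t" " ") "\\" "/") "\"" "'") "|" "/") "`" "'"
  -- label = "".join(ch if ch.isprintable() else " " for ch in label)
  let label := String.ofList (label.toList.map (fun ch => if pvPrintable ch then ch else ' '))
  -- " ".join(label.split()).strip()
  PySem.Str.strip (PySem.Str.join " " (PySem.Str.split₀ label))

-- ===== PORT B =====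
-- sub = {'\r':' ', '\n':' ', '\t':' ', '\\':'/', '"':"'", '|':'/', '`':"'"}
def pvSub : PySem.Dict Char Char :=
  PySem.Dict.mk [('\r', ' '), ('\n', ' '), ('\t', ' '), ('\\', '/'), ('"', '\''), ('|', '/'), ('`', '\'')]

-- one iteration of B's loop body, state = (out, prev_space)
def pvStep (st : List Char × Bool) (ch : Char) : List Char × Bool :=
  let ch := pvSub.getD ch ch
  let ch := if pvPrintable ch then ch else ' '
  if ch = ' ' then (if st.2 then st.1 else st.1 ++ [' '], true)
  else (st.1 ++ [ch], false)

def safe_mermaid_label_py_alt (value : String) : String :=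
  let label := if value = "" then "" else value
  let st := label.toList.foldl pvStep ([], true)
  -- if out and out[-1] == ' ': out.pop()
  let out := if st.1 ≠ [] ∧ st.1.getLast? = some ' ' then st.1.dropLast else st.1
  String.ofList out

-- ===== PRECONDITION & SPEC =====
def Spec_safe_mermaid_label_py (value : String) (out : String) : Prop := out = safe_mermaid_label_py_alt value
instance (value : String) (out : String) : Decidable (Spec_safe_mermaid_label_py value out) := by unfold Spec_safe_mermaid_label_py; infer_instance

-- ===== CLAIM (what is proved, stated in full; the proofs are below) =====
def Claim_equal_safe_mermaid_label_py : Prop := ∀ (value : String), Dom_safe_mermaid_label_py value → Spec_safe_mermaid_label_py value (safe_mermaid_label_py value)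

-- ===== LEMMAS AND PROOFS =====

-- the per-char effect of A's replace chain
def pvMsub (c : Char) : Char :=
  if c = '\r' then ' ' else if c = '\n' then ' ' else if c = '\t' then ' '
  else if c = '\\' then '/' else if c = '"' then '\'' else if c = '|' then '/'
  else if c = '`' then '\'' else c

-- the combined per-char map both sides apply before collapsing
def pvF (c : Char) : Char := if pvPrintable (pvMsub c) then pvMsub c else ' '

-- B's loop body after the per-char map has been factored out
def pvBstep (st : List Char × Bool) (ch : Char) : List Char × Bool :=
  if ch = ' ' then (if st.2 then st.1 else st.1 ++ [' '], true)
  else (st.1 ++ [ch], false)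

def pvTrim (out : List Char) : List Char :=
  if out ≠ [] ∧ out.getLast? = some ' ' then out.dropLast else out

-- the accumulated output of B corresponding to split₀'s loop state (cur, acc)
def pvOutOf (cur : List Char) (acc : List (List Char)) : List Char :=
  PySem.Chars.join [' '] acc.reverse ++ (if acc.isEmpty then [] else [' ']) ++ cur.reverse

lemma replace_go_single (o n : Char) : ∀ (l acc : List Char),
    PySem.Chars.replace.go [o] [n] l.length l acc
      = acc.reverse ++ l.map (fun c => if c = o then n else c) := by
  intro l
  induction l with
  | nil => intro acc; simp [PySem.Chars.replace.go]
  | cons c t ih =>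
    intro acc
    by_cases h : c = o
    · subst h
      have hp : [c].isPrefixOf (c :: t) = true := by simp [List.isPrefixOf]
      simp [PySem.Chars.replace.go, hp, ih]
    · have hp : [o].isPrefixOf (c :: t) = false := by
        simp [List.isPrefixOf]; exact fun hc => absurd hc.symm h
      simp [PySem.Chars.replace.go, hp, ih, h]

lemma replace_single (o n : Char) (l : List Char) :
    PySem.Chars.replace l [o] [n] = l.map (fun c => if c = o then n else c) := by
  simp [PySem.Chars.replace, replace_go_single]

set_option maxHeartbeats 1000000 in
lemma chainA (s : String) :
    (PySem.Str.replace (PySem.Str.replace (PySem.Str.replace (PySem.Str.replace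
      (PySem.Str.replace (PySem.Str.replace (PySem.Str.replace s "\r" " ")
      "\n" " ") "\t" " ") "\\" "/") "\"" "'") "|" "/") "`" "'").toList
      = s.toList.map pvMsub := by
  simp only [PySem.Str.toList_replace]
  have h1 : ("\r" : String).toList = ['\r'] := by decide
  have h2 : (" " : String).toList = [' '] := by decide
  have h3 : ("\n" : String).toList = ['\n'] := by decide
  have h4 : ("\t" : String).toList = ['\t'] := by decide
  have h5 : ("\\" : String).toList = ['\\'] := by decide
  have h6 : ("/" : String).toList = ['/'] := by decide
  have h7 : ("\"" : String).toList = ['"'] := by decide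
  have h8 : ("'" : String).toList = ['\''] := by decide
  have h9 : ("|" : String).toList = ['|'] := by decide
  have h10 : ("`" : String).toList = ['`'] := by decide
  rw [h1, h2, h3, h4, h5, h6, h7, h8, h9, h10]
  simp only [replace_single, List.map_map]
  apply List.map_congr_left
  intro c _
  simp only [Function.comp_apply]
  by_cases k1 : c = '\r'; · subst k1; rfl
  by_cases k2 : c = '\n'; · subst k2; rfl
  by_cases k3 : c = '\t'; · subst k3; rfl
  by_cases k4 : c = '\\'; · subst k4; rfl
  by_cases k5 : c = '"'; · subst k5; rfl
  by_cases k6 : c = '|'; · subst k6; rfl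
  by_cases k7 : c = '`'; · subst k7; rfl
  simp [pvMsub, k1, k2, k3, k4, k5, k6, k7]

lemma sub_eq_msub (c : Char) : pvSub.getD c c = pvMsub c := by
  unfold pvSub pvMsub
  by_cases k1 : c = '\r'; · subst k1; rfl
  by_cases k2 : c = '\n'; · subst k2; rfl
  by_cases k3 : c = '\t'; · subst k3; rfl
  by_cases k4 : c = '\\'; · subst k4; rfl
  by_cases k5 : c = '"'; · subst k5; rfl
  by_cases k6 : c = '|'; · subst k6; rfl
  by_cases k7 : c = '`'; · subst k7; rfl
  have e1 : ('\r' == c) = false := by simp [Ne.symm k1]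
  have e2 : ('\n' == c) = false := by simp [Ne.symm k2]
  have e3 : ('\t' == c) = false := by simp [Ne.symm k3]
  have e4 : ('\\' == c) = false := by simp [Ne.symm k4]
  have e5 : ('"' == c) = false := by simp [Ne.symm k5]
  have e6 : ('|' == c) = false := by simp [Ne.symm k6]
  have e7 : ('`' == c) = false := by simp [Ne.symm k7]
  simp [PySem.Dict.getD, PySem.Dict.get?, List.find?, e1, e2, e3, e4, e5, e6, e7,
    k1, k2, k3, k4, k5, k6, k7]

lemma pvStep_eq (st : List Char × Bool) (c : Char) : pvStep st c = pvBstep st (pvF c) := by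
  simp [pvStep, pvBstep, pvF, sub_eq_msub]

lemma pvF_range (c : Char) : 32 ≤ (pvF c).toNat ∧ (pvF c).toNat ≤ 126 := by
  unfold pvF
  by_cases h : pvPrintable (pvMsub c) = true
  · simp only [h, if_true]
    simpa [pvPrintable, Bool.and_eq_true, decide_eq_true_eq] using h
  · simp [h]

lemma isspace_of_range (c : Char) (h1 : 32 ≤ c.toNat) (h2 : c.toNat ≤ 126) :
    PySem.Chars.isspace c = decide (c = ' ') := by
  have key : c = ' ' ↔ c.toNat = 32 := by
    constructor
    · intro h; subst h; rfl
    · intro h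
      have := Char.ofNat_toNat c
      rw [h] at this
      exact this.symm
  by_cases h32 : c.toNat = 32
  · have : c = ' ' := key.mpr h32
    subst this; rfl
  · have hne : c ≠ ' ' := fun h => h32 (key.mp h)
    have hsp : PySem.Chars.isspace c = false := by
      simp only [PySem.Chars.isspace]
      simp only [Bool.or_eq_false_iff, Bool.and_eq_false_iff, decide_eq_false_iff_not]
      omega
    simp [hsp, hne]

-- good words: nonempty, no whitespace chars
def pvGood (ws : List (List Char)) : Prop :=
  ∀ w ∈ ws, w ≠ [] ∧ ∀ c ∈ w, PySem.Chars.isspace c = false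

lemma join_ne_nil (ws : List (List Char)) (hg : pvGood ws) (h : ws ≠ []) :
    PySem.Chars.join [' '] ws ≠ [] := by
  match ws with
  | [] => exact absurd rfl h
  | [w] =>
    rw [PySem.Chars.join_singleton]
    exact (hg w (by simp)).1
  | w :: y :: t =>
    rw [PySem.Chars.join_cons_cons]
    have hw : w ≠ [] := (hg w (by simp)).1
    simp [hw]

lemma join_head (ws : List (List Char)) (hg : pvGood ws) (c : Char)
    (h : (PySem.Chars.join [' '] ws).head? = some c) : PySem.Chars.isspace c = false := by
  match ws with
  | [] => simp [PySem.Chars.join, List.intercalate] at h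
  | [w] =>
    rw [PySem.Chars.join_singleton] at h
    obtain ⟨a, t', rfl⟩ := List.exists_cons_of_ne_nil (hg w (by simp)).1
    simp at h
    exact h ▸ (hg (a :: t') (by simp)).2 a (by simp)
  | w :: y :: t =>
    rw [PySem.Chars.join_cons_cons] at h
    have hw : w ≠ [] := (hg w (by simp)).1
    obtain ⟨a, t', rfl⟩ := List.exists_cons_of_ne_nil hw
    simp at h
    exact h ▸ (hg (a :: t') (by simp)).2 a (by simp)

lemma join_last (ws : List (List Char)) (hg : pvGood ws) (c : Char)
    (h : (PySem.Chars.join [' '] ws).getLast? = some c) : PySem.Chars.isspace c = false := by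
  induction ws with
  | nil => simp [PySem.Chars.join, List.intercalate] at h
  | cons w rest ih =>
    cases rest with
    | nil =>
      rw [PySem.Chars.join_singleton] at h
      exact (hg w (by simp)).2 c (List.mem_of_getLast? h)
    | cons y t =>
      rw [PySem.Chars.join_cons_cons] at h
      have hJ : PySem.Chars.join [' '] (y :: t) ≠ [] :=
        join_ne_nil _ (fun u hu => hg u (by simp [hu])) (by simp)
      rw [List.append_assoc, List.getLast?_append] at h
      rw [List.getLast?_append] at h
      rcases hL : (PySem.Chars.join [' '] (y :: t)).getLast? with _ | d
      · exact absurd (List.getLast?_eq_none_iff.mp hL) hJ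
      · rw [hL] at h
        simp at h
        subst h
        exact ih (fun u hu => hg u (by simp [hu])) hL

lemma lstrip_eq_self (l : List Char) (h : ∀ c, l.head? = some c → PySem.Chars.isspace c = false) :
    PySem.Chars.lstrip l = l := by
  cases l with
  | nil => rfl
  | cons c t =>
    have := h c rfl
    simp [PySem.Chars.lstrip, this]

lemma rstrip_eq_self (l : List Char) (h : ∀ c, l.getLast? = some c → PySem.Chars.isspace c = false) :
    PySem.Chars.rstrip l = l := by
  rcases List.eq_nil_or_concat l with rfl | ⟨l', a, rfl⟩
  · rfl
  · have ha : PySem.Chars.isspace a = false := h a (by simp)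
    simp [PySem.Chars.rstrip, ha]

lemma strip_join (ws : List (List Char)) (hg : pvGood ws) :
    PySem.Chars.strip (PySem.Chars.join [' '] ws) = PySem.Chars.join [' '] ws := by
  unfold PySem.Chars.strip
  rw [lstrip_eq_self _ (fun c hc => join_head ws hg c hc)]
  exact rstrip_eq_self _ (fun c hc => join_last ws hg c hc)

lemma join_append_singleton (ws : List (List Char)) (w : List Char) :
    PySem.Chars.join [' '] (ws ++ [w])
      = PySem.Chars.join [' '] ws ++ (if ws.isEmpty then [] else [' ']) ++ w := by
  induction ws with
  | nil => simp [PySem.Chars.join, List.intercalate]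
  | cons x rest ih =>
    cases rest with
    | nil => simp [PySem.Chars.join, List.intercalate]
    | cons y t =>
      rw [show (x :: y :: t ++ [w]) = x :: ((y :: t) ++ [w]) by simp,
        show ((y :: t) ++ [w]) = y :: (t ++ [w]) by simp]
      rw [PySem.Chars.join_cons_cons, PySem.Chars.join_cons_cons]
      rw [show y :: (t ++ [w]) = (y :: t) ++ [w] by simp, ih]
      simp [List.append_assoc]

lemma core : ∀ (ms cur : List Char) (acc : List (List Char)),
    (∀ c ∈ ms, PySem.Chars.isspace c = decide (c = ' ')) →
    (∀ c ∈ cur, PySem.Chars.isspace c = false) →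
    pvGood acc.reverse →
    PySem.Chars.strip (PySem.Chars.join [' '] (PySem.Chars.split₀.go ms cur acc))
      = pvTrim (List.foldl pvBstep (pvOutOf cur acc, cur.isEmpty) ms).1 := by
  intro ms
  induction ms with
  | nil =>
    intro cur acc _ hcur hacc
    cases cur with
    | nil =>
      rw [show PySem.Chars.split₀.go [] [] acc = acc.reverse by simp [PySem.Chars.split₀.go]]
      rw [strip_join _ hacc]
      cases acc with
      | nil => simp [pvOutOf, pvTrim, PySem.Chars.join, List.intercalate]
      | cons w rest =>
        have hJ : PySem.Chars.join [' '] (w :: rest).reverse ≠ [] :=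
          join_ne_nil _ hacc (by simp)
        simp only [pvOutOf, List.foldl_nil, List.isEmpty_cons, if_neg Bool.false_ne_true,
          List.reverse_nil, List.append_nil, pvTrim]
        rw [if_pos ⟨by simp, by simp⟩]
        simp
    | cons a t =>
      have hcur' : (a :: t).reverse ≠ [] := by simp
      rw [show PySem.Chars.split₀.go [] (a :: t) acc = acc.reverse ++ [(a :: t).reverse] by
        simp [PySem.Chars.split₀.go]]
      have hg : pvGood (acc.reverse ++ [(a :: t).reverse]) := by
        intro w hw
        rcases List.mem_append.mp hw with hw | hw
        · exact hacc w hw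
        · simp at hw
          subst hw
          refine ⟨by simp, fun c hc => ?_⟩
          apply hcur
          simp at hc ⊢
          exact hc.symm
      rw [strip_join _ hg, join_append_singleton]
      have hlast : (pvOutOf (a :: t) acc).getLast? = some a := by
        unfold pvOutOf
        rw [List.getLast?_append]
        rw [show (a :: t).reverse = t.reverse ++ [a] from by simp, List.getLast?_concat]
        rfl
      have ha : a ≠ ' ' := by
        intro h
        have := hcur a (by simp)
        rw [h] at this
        exact absurd this (by decide)
      have htrim : pvTrim (pvOutOf (a :: t) acc) = pvOutOf (a :: t) acc := by
        unfold pvTrim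
        rw [if_neg]
        rintro ⟨-, h⟩
        rw [hlast] at h
        exact ha (by simpa using h)
      simp only [List.foldl_nil]
      rw [htrim]
      unfold pvOutOf
      cases acc <;> simp
  | cons c rest ih =>
    intro cur acc hms hcur hacc
    have hc := hms c (by simp)
    have hms' : ∀ d ∈ rest, PySem.Chars.isspace d = decide (d = ' ') :=
      fun d hd => hms d (by simp [hd])
    by_cases hsp : PySem.Chars.isspace c = true
    · have hc' : c = ' ' := by
        rw [hsp] at hc; exact of_decide_eq_true hc.symm
      subst hc'
      cases cur with
      | nil =>
        rw [show PySem.Chars.split₀.go (' ' :: rest) [] acc = PySem.Chars.split₀.go rest [] acc by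
          simp [PySem.Chars.split₀.go, hsp]]
        rw [show List.foldl pvBstep (pvOutOf [] acc, ([] : List Char).isEmpty) (' ' :: rest)
            = List.foldl pvBstep (pvOutOf [] acc, ([] : List Char).isEmpty) rest by
          simp [pvBstep]]
        exact ih [] acc hms' (by simp) hacc
      | cons a t =>
        rw [show PySem.Chars.split₀.go (' ' :: rest) (a :: t) acc
            = PySem.Chars.split₀.go rest [] ((a :: t).reverse :: acc) by
          simp [PySem.Chars.split₀.go, hsp]]
        have hout : pvOutOf (a :: t) acc ++ [' '] = pvOutOf [] ((a :: t).reverse :: acc) := by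
          simp only [pvOutOf, List.reverse_cons, List.isEmpty_cons, List.reverse_nil,
            List.append_nil]
          rw [join_append_singleton]
          simp [List.append_assoc]
        have hstep : List.foldl pvBstep (pvOutOf (a :: t) acc, (a :: t).isEmpty) (' ' :: rest)
            = List.foldl pvBstep (pvOutOf [] ((a :: t).reverse :: acc),
                ([] : List Char).isEmpty) rest := by
          simp [pvBstep, hout]
        rw [hstep]
        have hacc' : pvGood ((a :: t).reverse :: acc).reverse := by
          intro w hw
          simp only [List.reverse_cons] at hw
          rcases List.mem_append.mp hw with hw | hw
          · exact hacc w hw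
          · simp at hw
            subst hw
            exact ⟨by simp, fun d hd => hcur d (by simp at hd ⊢; exact hd.symm)⟩
        exact ih [] ((a :: t).reverse :: acc) hms' (by simp) hacc'
    · have hsp' : PySem.Chars.isspace c = false := by
        cases h : PySem.Chars.isspace c
        · rfl
        · exact absurd h hsp
      have hc' : c ≠ ' ' := by
        intro h; subst h; exact hsp (by decide)
      rw [show PySem.Chars.split₀.go (c :: rest) cur acc
          = PySem.Chars.split₀.go rest (c :: cur) acc by
        simp [PySem.Chars.split₀.go, hsp']]
      have hout : pvOutOf cur acc ++ [c] = pvOutOf (c :: cur) acc := by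
        simp [pvOutOf, List.append_assoc]
      have hstep : List.foldl pvBstep (pvOutOf cur acc, cur.isEmpty) (c :: rest)
          = List.foldl pvBstep (pvOutOf (c :: cur) acc, (c :: cur).isEmpty) rest := by
        simp [pvBstep, hc', hout]
      rw [hstep]
      exact ih (c :: cur) acc hms'
        (fun d hd => by rcases List.mem_cons.mp hd with rfl | hd; exact hsp'; exact hcur d hd)
        hacc

lemma main_lemma (l : List Char) :
    PySem.Chars.strip (PySem.Chars.join [' '] (PySem.Chars.split₀ (l.map pvF)))
      = pvTrim (List.foldl pvBstep (([] : List Char), true) (l.map pvF)).1 := by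
  have hms : ∀ c ∈ l.map pvF, PySem.Chars.isspace c = decide (c = ' ') := by
    intro c hc
    rcases List.mem_map.mp hc with ⟨a, _, rfl⟩
    exact isspace_of_range _ (pvF_range a).1 (pvF_range a).2
  have h := core (l.map pvF) [] [] hms (by simp) (by intro w hw; simp at hw)
  simpa [pvOutOf, PySem.Chars.split₀] using h

-- ===== VERDICT (by name: the statement is the Claim_ definition above) =====
theorem safe_mermaid_label_py_spec : Claim_equal_safe_mermaid_label_py := by
  intro value _
  unfold Spec_safe_mermaid_label_py safe_mermaid_label_py safe_mermaid_label_py_alt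
  apply String.toList_inj.mp
  set lab := if value = "" then "" else value with hlab
  have hstep : pvStep = fun st c => pvBstep st (pvF c) := by
    funext st c; exact pvStep_eq st c
  have hA : (String.ofList ((PySem.Str.replace (PySem.Str.replace (PySem.Str.replace
      (PySem.Str.replace (PySem.Str.replace (PySem.Str.replace (PySem.Str.replace lab "\r" " ")
      "\n" " ") "\t" " ") "\\" "/") "\"" "'") "|" "/") "`" "'").toList.map
      (fun ch => if pvPrintable ch then ch else ' '))).toList = lab.toList.map pvF := by
    rw [chainA]
    simp [List.map_map, pvF, Function.comp]
  simp only [PySem.Str.toList_strip]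
  rw [show (PySem.Str.join " " (PySem.Str.split₀ (String.ofList
      ((PySem.Str.replace (PySem.Str.replace (PySem.Str.replace (PySem.Str.replace
      (PySem.Str.replace (PySem.Str.replace (PySem.Str.replace lab "\r" " ")
      "\n" " ") "\t" " ") "\\" "/") "\"" "'") "|" "/") "`" "'").toList.map
      (fun ch => if pvPrintable ch then ch else ' '))))).toList
      = PySem.Chars.join [' '] (PySem.Chars.split₀ (lab.toList.map pvF)) by
    rw [PySem.Str.toList_join, PySem.Str.split₀_map_toList, hA]
    rfl]
  rw [hstep, ← List.foldl_map]
  rw [main_lemma]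
  simp [pvTrim]
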